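-- pv_equiv track=rewrite | github.com/MoJeffrey/Steelalculation | main.py | GetAllOriginSteelLengthCombination
-- ===== SOURCE A (Python) =====
-- import copy
-- from typing import List
--
-- def GetAllOriginSteelLengthCombination(AllOriginSteelLengthList: list, MaxDifferentLength: int) -> List[list]:
--     def append(CombinationList: List[list]) -> List[list]:
--         NewCombinationList = []
--         if len(CombinationList) == 0:
--             for SteelLength in AllOriginSteelLengthList:
--                 TheCombination = [SteelLength]
--                 NewCombinationList.append(TheCombination)
--         else:
--             for NowSteelLength in CombinationList:
--                 for SteelLength in AllOriginSteelLengthList: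
--                     TheCombination = copy.deepcopy(NowSteelLength)
--                     TheCombination.append(SteelLength)
--                     TheCombination.sort()
--
--                     if TheCombination in NewCombinationList:
--                         continue
--
--                     NewCombinationList.append(TheCombination)
--
--         return NewCombinationList
--
--     AllOriginSteelLengthCombination: List[list] = []
--
--     for Num in range(0, MaxDifferentLength):
--         AllOriginSteelLengthCombination = append(copy.deepcopy(AllOriginSteelLengthCombination))
--
--     return AllOriginSteelLengthCombination
-- ===== SOURCE B (Python) =====
-- from typing import List
--
--
-- def GetAllOriginSteelLengthCombination(AllOriginSteelLengthList: list, MaxDifferentLength: int) -> List[list]: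
--     def tuples(k: int):
--         # all k-tuples over the input list, rightmost position varying fastest
--         if k == 0:
--             yield []
--             return
--         for t in tuples(k - 1):
--             for x in AllOriginSteelLengthList:
--                 yield t + [x]
--
--     if MaxDifferentLength < 1:
--         return []
--     result: List[list] = []
--     seen = set()
--     for t in tuples(MaxDifferentLength):
--         s = sorted(t)
--         key = tuple(s)
--         if key not in seen:
--             seen.add(key)
--             result.append(s)
--     return result
-- ===== Notes on version B (the rewrite author's own statement) =====
-- stated objective: alternative
-- what changed: Replaces A's level-by-level rebuild (k passes, each rescanning the growing output list for membership) with a single direct enumeration of all k-tuples, sorting each and deduplicating once via a hash set; B also dedups uniformly at size 1.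
-- intended difference: When MaxDifferentLength == 1 and the input list contains duplicate lengths, A returns one singleton per occurrence (it skips its dedup step only at size 1) while B deduplicates as it does at every other size; the uniform dedup is the intended behaviour. — e.g. on GetAllOriginSteelLengthCombination([2, 2], 1): A returns [[2], [2]], B returns [[2]]
import Mathlib
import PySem

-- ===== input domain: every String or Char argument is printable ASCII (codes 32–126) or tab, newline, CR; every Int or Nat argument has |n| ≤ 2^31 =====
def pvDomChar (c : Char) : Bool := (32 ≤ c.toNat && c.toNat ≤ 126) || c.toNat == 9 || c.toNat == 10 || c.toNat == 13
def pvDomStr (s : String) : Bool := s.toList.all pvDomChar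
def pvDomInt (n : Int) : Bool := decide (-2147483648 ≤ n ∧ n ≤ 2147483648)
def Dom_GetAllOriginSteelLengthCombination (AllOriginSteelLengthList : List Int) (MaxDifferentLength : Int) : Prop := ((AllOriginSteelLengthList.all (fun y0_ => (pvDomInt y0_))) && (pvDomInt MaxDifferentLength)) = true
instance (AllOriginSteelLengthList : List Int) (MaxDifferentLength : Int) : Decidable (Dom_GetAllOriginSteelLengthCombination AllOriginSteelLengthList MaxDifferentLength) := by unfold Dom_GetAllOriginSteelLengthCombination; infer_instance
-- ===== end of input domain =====

-- B enumerates all MaxDifferentLength-tuples directly (rightmost position fastest), sorts each and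
-- deduplicates once with a set, instead of A's level-by-level rebuild with list-membership rescans;
-- B deduplicates uniformly at size 1 too (see D_ below).

-- ===== PORT A =====
-- inner helper 'append' of A: one level of the incremental build
def pvA_append (All : List Int) (CombinationList : List (List Int)) : List (List Int) :=
  if CombinationList.length = 0 then
    All.foldl (fun acc s => acc ++ [[s]]) []
  else
    CombinationList.foldl (fun acc now =>
      All.foldl (fun acc2 s =>
        let c := PySem.List.sorted (now ++ [s]) (fun x => x) false
        if c ∈ acc2 then acc2 else acc2 ++ [c]) acc) []

def GetAllOriginSteelLengthCombination (AllOriginSteelLengthList : List Int) (MaxDifferentLength : Int) : List (List Int) :=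
  (PySem.List.pyRange 0 MaxDifferentLength 1).foldl
    (fun acc _ => pvA_append AllOriginSteelLengthList acc) []

-- ===== PORT B =====
-- B's helper generator 'tuples': all k-tuples over the input, rightmost position varying fastest
def pvB_tuples (All : List Int) : Nat → List (List Int)
  | 0 => [[]]
  | n + 1 => (pvB_tuples All n).flatMap (fun t => All.map (fun x => t ++ [x]))

def GetAllOriginSteelLengthCombination_alt (AllOriginSteelLengthList : List Int) (MaxDifferentLength : Int) : List (List Int) :=
  if MaxDifferentLength < 1 then []
  else
    ((pvB_tuples AllOriginSteelLengthList MaxDifferentLength.toNat).foldl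
      (fun (st : List (List Int) × PySem.Set (List Int)) t =>
        let s := PySem.List.sorted t (fun x => x) false
        if s ∈ st.2 then st else (st.1 ++ [s], st.2.add s))
      ([], PySem.Set.empty)).1

-- ===== PRECONDITION & SPEC =====
-- When MaxDifferentLength == 1 and the input list contains duplicate lengths, A returns one singleton
-- per occurrence (it skips its dedup step only at size 1) while B deduplicates as at every other size;
-- the uniform dedup is the intended behaviour.
def D_GetAllOriginSteelLengthCombination (AllOriginSteelLengthList : List Int) (MaxDifferentLength : Int) : Prop :=
  MaxDifferentLength = 1 ∧ ¬ AllOriginSteelLengthList.Nodup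
instance (AllOriginSteelLengthList : List Int) (MaxDifferentLength : Int) : Decidable (D_GetAllOriginSteelLengthCombination AllOriginSteelLengthList MaxDifferentLength) := by unfold D_GetAllOriginSteelLengthCombination; infer_instance

def Spec_GetAllOriginSteelLengthCombination (AllOriginSteelLengthList : List Int) (MaxDifferentLength : Int) (out : List (List Int)) : Prop := ¬ D_GetAllOriginSteelLengthCombination AllOriginSteelLengthList MaxDifferentLength → out = GetAllOriginSteelLengthCombination_alt AllOriginSteelLengthList MaxDifferentLength
instance (AllOriginSteelLengthList : List Int) (MaxDifferentLength : Int) (out : List (List Int)) : Decidable (Spec_GetAllOriginSteelLengthCombination AllOriginSteelLengthList MaxDifferentLength out) := by unfold Spec_GetAllOriginSteelLengthCombination; infer_instance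

def pvDiffWitness_GetAllOriginSteelLengthCombination : List Int × Int := ([2, 2], 1)
def pvDiffWitnessOut_GetAllOriginSteelLengthCombination : (List (List Int)) × (List (List Int)) := ([[2], [2]], [[2]])

-- ===== CLAIM (what is proved, stated in full; the proofs are below) =====
def Claim_unchanged_GetAllOriginSteelLengthCombination : Prop := ∀ (AllOriginSteelLengthList : List Int) (MaxDifferentLength : Int), Dom_GetAllOriginSteelLengthCombination AllOriginSteelLengthList MaxDifferentLength → Spec_GetAllOriginSteelLengthCombination AllOriginSteelLengthList MaxDifferentLength (GetAllOriginSteelLengthCombination AllOriginSteelLengthList MaxDifferentLength)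
def Claim_changed_GetAllOriginSteelLengthCombination : Prop := Dom_GetAllOriginSteelLengthCombination (pvDiffWitness_GetAllOriginSteelLengthCombination.1) (pvDiffWitness_GetAllOriginSteelLengthCombination.2) ∧ D_GetAllOriginSteelLengthCombination (pvDiffWitness_GetAllOriginSteelLengthCombination.1) (pvDiffWitness_GetAllOriginSteelLengthCombination.2) ∧ GetAllOriginSteelLengthCombination (pvDiffWitness_GetAllOriginSteelLengthCombination.1) (pvDiffWitness_GetAllOriginSteelLengthCombination.2) = pvDiffWitnessOut_GetAllOriginSteelLengthCombination.1 ∧ GetAllOriginSteelLengthCombination_alt (pvDiffWitness_GetAllOriginSteelLengthCombination.1) (pvDiffWitness_GetAllOriginSteelLengthCombination.2) = pvDiffWitnessOut_GetAllOriginSteelLengthCombination.2 ∧ pvDiffWitnessOut_GetAllOriginSteelLengthCombination.1 ≠ pvDiffWitnessOut_GetAllOriginSteelLengthCombination.2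
def Claim_exact_GetAllOriginSteelLengthCombination : Prop := ∀ (AllOriginSteelLengthList : List Int) (MaxDifferentLength : Int), Dom_GetAllOriginSteelLengthCombination AllOriginSteelLengthList MaxDifferentLength → D_GetAllOriginSteelLengthCombination AllOriginSteelLengthList MaxDifferentLength → GetAllOriginSteelLengthCombination AllOriginSteelLengthList MaxDifferentLength ≠ GetAllOriginSteelLengthCombination_alt AllOriginSteelLengthList MaxDifferentLength

-- ===== LEMMAS AND PROOFS =====

-- sorting an Int list (Python's list.sort) as both ports use it
def pvSortl (t : List Int) : List Int := PySem.List.sorted t (fun x => x) false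

-- one sorted extension step and one whole level of extensions
def pvExt1 (All : List Int) (c : List Int) : List (List Int) :=
  All.map (fun x => pvSortl (c ++ [x]))
def pvExtL (All : List Int) (L : List (List Int)) : List (List Int) :=
  L.flatMap (pvExt1 All)

-- "append each element unless already present" (A's inner dedup loop, flattened)
def pvInsertAll (acc : List (List Int)) (xs : List (List Int)) : List (List Int) :=
  xs.foldl (fun a c => if c ∈ a then a else a ++ [c]) acc

-- first-occurrence dedup relative to a seen-list
def pvKeepNew (seen : List (List Int)) : List (List Int) → List (List Int)
  | [] => []
  | x :: xs => if x ∈ seen then pvKeepNew seen xs else x :: pvKeepNew (x :: seen) xs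

-- sorted tuples of the full product, level by level
def pvRawT (All : List Int) : Nat → List (List Int)
  | 0 => [[]]
  | n + 1 => pvExtL All (pvRawT All n)

-- A's loop state after n iterations
def pvLA (All : List Int) : Nat → List (List Int)
  | 0 => []
  | n + 1 => pvA_append All (pvLA All n)

theorem pvSortl_sortl_append (t : List Int) (x : Int) :
    pvSortl (pvSortl t ++ [x]) = pvSortl (t ++ [x]) := by
  unfold pvSortl
  apply PySem.List.sorted_eq_sorted_of_perm _ _ _ (fun a b h => h)
  exact (PySem.List.sorted_perm t (fun y => y) false).append_right _

theorem pvRawT_eq_map_sortl (All : List Int) (n : Nat) :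
    pvRawT All n = (pvB_tuples All n).map pvSortl := by
  induction n with
  | zero => simp [pvRawT, pvB_tuples, pvSortl, PySem.List.sorted]
  | succ n ih =>
    simp only [pvRawT, pvB_tuples, pvExtL, pvExt1, ih, List.flatMap_map, List.map_flatMap,
      List.map_map]
    refine List.flatMap_congr (fun t _ => ?_)
    simp only [Function.comp_def, pvSortl_sortl_append]

theorem pvInsertAll_append (acc xs ys : List (List Int)) :
    pvInsertAll acc (xs ++ ys) = pvInsertAll (pvInsertAll acc xs) ys := by
  unfold pvInsertAll; rw [List.foldl_append]

theorem pvMem_insertAll (acc xs : List (List Int)) (a : List Int) :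
    a ∈ pvInsertAll acc xs ↔ a ∈ acc ∨ a ∈ xs := by
  induction xs generalizing acc with
  | nil => simp [pvInsertAll]
  | cons x xs ih =>
    simp only [pvInsertAll, List.foldl_cons] at *
    by_cases hx : x ∈ acc
    · rw [if_pos hx, ih]
      constructor
      · rintro (h | h) <;> simp_all
      · rintro (h | h) <;> simp_all
        rcases h with h | h <;> simp_all
    · rw [if_neg hx, ih]
      simp only [List.mem_append, List.mem_cons]
      tauto

theorem pvInsertAll_of_covered (acc ys : List (List Int)) (h : ∀ y ∈ ys, y ∈ acc) :
    pvInsertAll acc ys = acc := by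
  induction ys with
  | nil => rfl
  | cons y ys ih =>
    simp only [pvInsertAll, List.foldl_cons] at *
    rw [if_pos (h y (by simp))]
    exact ih (fun z hz => h z (by simp [hz]))

theorem pvInsertAll_eq_keepNew (xs : List (List Int)) : ∀ (acc seen : List (List Int)),
    (∀ a, a ∈ seen ↔ a ∈ acc) → pvInsertAll acc xs = acc ++ pvKeepNew seen xs := by
  induction xs with
  | nil => intro acc seen _; simp [pvInsertAll, pvKeepNew]
  | cons x xs ih =>
    intro acc seen h
    simp only [pvInsertAll, List.foldl_cons, pvKeepNew]
    by_cases hx : x ∈ seen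
    · rw [if_pos ((h x).mp hx), if_pos hx]
      exact ih acc seen h
    · rw [if_neg (fun hc => hx ((h x).mpr hc)), if_neg hx]
      show pvInsertAll (acc ++ [x]) xs = _
      rw [ih (acc ++ [x]) (x :: seen) (by intro a; simp [h a]; tauto)]
      simp

theorem pvG (All : List Int) (xs : List (List Int)) : ∀ (s₁ acc : List (List Int)),
    (∀ c ∈ s₁, ∀ e ∈ pvExt1 All c, e ∈ acc) →
    pvInsertAll acc (pvExtL All (pvKeepNew s₁ xs)) = pvInsertAll acc (pvExtL All xs) := by
  induction xs with
  | nil => intro s₁ acc _; rfl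
  | cons x xs ih =>
    intro s₁ acc h
    simp only [pvKeepNew]
    by_cases hx : x ∈ s₁
    · rw [if_pos hx]
      have hcov : pvInsertAll acc (pvExt1 All x) = acc :=
        pvInsertAll_of_covered acc _ (h x hx)
      calc pvInsertAll acc (pvExtL All (pvKeepNew s₁ xs))
          = pvInsertAll acc (pvExtL All xs) := ih s₁ acc h
        _ = pvInsertAll (pvInsertAll acc (pvExt1 All x)) (pvExtL All xs) := by rw [hcov]
        _ = pvInsertAll acc (pvExtL All (x :: xs)) := by
              rw [← pvInsertAll_append]; simp [pvExtL, List.flatMap_cons]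
    · rw [if_neg hx]
      have hstep : ∀ L, pvInsertAll acc (pvExtL All (x :: L))
          = pvInsertAll (pvInsertAll acc (pvExt1 All x)) (pvExtL All L) := by
        intro L
        rw [← pvInsertAll_append]; simp [pvExtL, List.flatMap_cons]
      rw [hstep, hstep]
      refine ih (x :: s₁) _ ?_
      intro c hc e he
      rw [pvMem_insertAll]
      rcases List.mem_cons.mp hc with rfl | hc
      · exact Or.inr he
      · exact Or.inl (h c hc e he)

theorem pvA_append_nonempty (All : List Int) (L : List (List Int)) (h : L ≠ []) :
    pvA_append All L = pvInsertAll [] (pvExtL All L) := by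
  unfold pvA_append
  rw [if_neg (by simpa using h)]
  unfold pvInsertAll pvExtL
  rw [List.foldl_flatMap]
  have hfn : ∀ (acc : List (List Int)) (now : List Int),
      List.foldl (fun a c => if c ∈ a then a else a ++ [c]) acc (pvExt1 All now)
      = All.foldl (fun acc2 s =>
          let c := PySem.List.sorted (now ++ [s]) (fun x => x) false
          if c ∈ acc2 then acc2 else acc2 ++ [c]) acc := by
    intro acc now
    unfold pvExt1 pvSortl
    rw [List.foldl_map]
  simp only [hfn]

theorem pvLA_one (All : List Int) : pvLA All 1 = All.map (fun s => [s]) := by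
  show pvA_append All [] = _
  unfold pvA_append
  simp only [List.length_nil, reduceIte, PySem.List.foldl_append_singleton_eq_map,
    List.nil_append]

theorem pvRawT_one (All : List Int) : pvRawT All 1 = All.map (fun s => [s]) := by
  show pvExtL All (pvRawT All 0) = _
  simp only [pvRawT, pvExtL, pvExt1, List.flatMap_cons, List.flatMap_nil, List.append_nil,
    List.nil_append]
  refine List.map_congr_left (fun x _ => ?_)
  simp [pvSortl, PySem.List.sorted, PySem.List.insertBy]

theorem pvKeepNew_nil_ne_nil (xs : List (List Int)) (h : xs ≠ []) : pvKeepNew [] xs ≠ [] := by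
  cases xs with
  | nil => exact absurd rfl h
  | cons x xs => simp [pvKeepNew]

theorem pvRawT_ne_nil (All : List Int) (hA : All ≠ []) (n : Nat) (hn : 1 ≤ n) :
    pvRawT All n ≠ [] := by
  induction n with
  | zero => omega
  | succ n ih =>
    cases Nat.eq_or_lt_of_le hn with
    | inl h1 =>
      rw [← h1]
      intro hc
      rw [pvRawT_one] at hc
      exact hA (List.map_eq_nil_iff.mp hc)
    | inr h1 =>
      have hne := ih (by omega)
      intro hc
      simp only [pvRawT, pvExtL, List.flatMap_eq_nil_iff] at hc
      obtain ⟨c, hc1⟩ := List.exists_mem_of_ne_nil _ hne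
      have := hc c hc1
      simp [pvExt1, hA] at this

theorem pvExtL_of_all_nil (L : List (List Int)) : pvExtL [] L = [] := by
  simp [pvExtL, pvExt1]

theorem pvRawT_nil_of_all_nil (n : Nat) (hn : 1 ≤ n) : pvRawT [] n = [] := by
  cases n with
  | zero => omega
  | succ n => cases n with
    | zero => simp [pvRawT_one]
    | succ m => show pvExtL [] _ = []; exact pvExtL_of_all_nil _

theorem pvLA_eq_keepNew (All : List Int) (m : Nat) :
    pvLA All (m + 2) = pvKeepNew [] (pvRawT All (m + 2)) := by
  by_cases hA : All = []
  · subst hA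
    have hr : ∀ j, 1 ≤ j → pvKeepNew [] (pvRawT [] j) = [] := by
      intro j hj; rw [pvRawT_nil_of_all_nil j hj]; rfl
    induction m with
    | zero =>
      show pvA_append [] (pvLA [] 1) = _
      rw [pvLA_one, hr 2 (by omega)]
      rfl
    | succ m ih =>
      show pvA_append [] (pvLA [] (m + 2)) = _
      rw [ih, hr (m + 2) (by omega), hr (m + 3) (by omega)]
      rfl
  · induction m with
    | zero =>
      show pvA_append All (pvLA All 1) = _
      have h1 : pvLA All 1 ≠ [] := by rw [pvLA_one]; simp [hA]
      rw [pvA_append_nonempty All _ h1, pvLA_one, ← pvRawT_one All]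
      rw [pvInsertAll_eq_keepNew _ [] [] (by simp)]
      rfl
    | succ m ih =>
      show pvA_append All (pvLA All (m + 2)) = _
      rw [ih]
      have hne : pvKeepNew [] (pvRawT All (m + 2)) ≠ [] :=
        pvKeepNew_nil_ne_nil _ (pvRawT_ne_nil All hA _ (by omega))
      rw [pvA_append_nonempty All _ hne, pvG All _ [] [] (by simp),
        pvInsertAll_eq_keepNew _ [] [] (by simp)]
      rfl

theorem pvB_fold_eq_insertAll (ts : List (List Int)) :
    ∀ (res : List (List Int)) (seen : PySem.Set (List Int)),
    (∀ a, a ∈ seen ↔ a ∈ res) →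
    (ts.foldl
      (fun (st : List (List Int) × PySem.Set (List Int)) t =>
        let s := PySem.List.sorted t (fun x => x) false
        if s ∈ st.2 then st else (st.1 ++ [s], st.2.add s))
      (res, seen)).1 = pvInsertAll res (ts.map pvSortl) := by
  induction ts with
  | nil => intro res seen _; rfl
  | cons t ts ih =>
    intro res seen h
    simp only [List.foldl_cons, List.map_cons, pvInsertAll]
    by_cases hs : pvSortl t ∈ seen
    · rw [if_pos (show PySem.List.sorted t (fun x => x) false ∈ seen from hs),
        if_pos ((h _).mp hs)]
      exact ih res seen h
    · rw [if_neg (show PySem.List.sorted t (fun x => x) false ∉ seen from hs),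
        if_neg (fun hc => hs ((h _).mpr hc))]
      refine ih _ _ ?_
      intro a
      rw [PySem.Set.mem_add]
      simp [h a, or_comm]

theorem pvAlt_eq_keepNew (All : List Int) (k : Int) (hk : 1 ≤ k) :
    GetAllOriginSteelLengthCombination_alt All k = pvKeepNew [] (pvRawT All k.toNat) := by
  unfold GetAllOriginSteelLengthCombination_alt
  rw [if_neg (by omega)]
  rw [pvB_fold_eq_insertAll _ [] PySem.Set.empty (by simp [PySem.Set.empty])]
  rw [← pvRawT_eq_map_sortl, pvInsertAll_eq_keepNew _ [] [] (by simp)]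
  rfl

theorem pvFoldl_const {α β : Type} (l : List α) (g : β → β) :
    ∀ (i : β), l.foldl (fun a _ => g a) i = g^[l.length] i := by
  induction l with
  | nil => intro i; rfl
  | cons x l ih =>
    intro i
    rw [List.foldl_cons, ih, List.length_cons, Function.iterate_succ_apply]

theorem pvLA_eq_iterate (All : List Int) (n : Nat) :
    pvLA All n = (pvA_append All)^[n] [] := by
  induction n with
  | zero => rfl
  | succ n ih => rw [Function.iterate_succ_apply']; show pvA_append All (pvLA All n) = _; rw [ih]

theorem pvA_eq_LA (All : List Int) (k : Int) :
    GetAllOriginSteelLengthCombination All k = pvLA All k.toNat := by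
  unfold GetAllOriginSteelLengthCombination
  rw [pvFoldl_const, pvLA_eq_iterate]
  by_cases hk : k ≤ 0
  · rw [PySem.List.pyRange_one_eq_nil hk]
    simp [Int.toNat_of_nonpos hk]
  · have hlen : (PySem.List.pyRange 0 k 1).length = k.toNat := by
      rw [PySem.List.pyRange_of_pos]
      · simp
        omega
      · omega
    rw [hlen]

theorem pvKeepNew_eq_self (xs : List (List Int)) : ∀ seen,
    xs.Nodup → (∀ x ∈ xs, x ∉ seen) → pvKeepNew seen xs = xs := by
  induction xs with
  | nil => intro seen _ _; rfl
  | cons x xs ih =>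
    intro seen hnd hns
    simp only [pvKeepNew, if_neg (hns x (by simp))]
    rw [ih (x :: seen) hnd.of_cons]
    intro y hy
    simp only [List.mem_cons, not_or]
    exact ⟨fun hyx => (List.nodup_cons.mp hnd).1 (hyx ▸ hy), hns y (by simp [hy])⟩

theorem pvKeepNew_not_mem_seen (xs : List (List Int)) : ∀ seen a,
    a ∈ pvKeepNew seen xs → a ∉ seen := by
  induction xs with
  | nil => intro seen a h; simp [pvKeepNew] at h
  | cons x xs ih =>
    intro seen a h
    simp only [pvKeepNew] at h
    by_cases hx : x ∈ seen
    · rw [if_pos hx] at h; exact ih seen a h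
    · rw [if_neg hx] at h
      rcases List.mem_cons.mp h with rfl | h
      · exact hx
      · intro hs
        exact ih (x :: seen) a h (by simp [hs])

theorem pvKeepNew_nodup (xs : List (List Int)) : ∀ seen, (pvKeepNew seen xs).Nodup := by
  induction xs with
  | nil => intro seen; simp [pvKeepNew]
  | cons x xs ih =>
    intro seen
    simp only [pvKeepNew]
    by_cases hx : x ∈ seen
    · rw [if_pos hx]; exact ih seen
    · rw [if_neg hx]
      refine List.nodup_cons.mpr ⟨?_, ih (x :: seen)⟩
      intro hc
      exact pvKeepNew_not_mem_seen xs (x :: seen) x hc (by simp)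

-- ===== VERDICT (by name: the statement is the Claim_ definition above) =====
theorem GetAllOriginSteelLengthCombination_spec : Claim_unchanged_GetAllOriginSteelLengthCombination := by
  intro All k _ hD
  by_cases hk0 : k < 1
  · rw [pvA_eq_LA, Int.toNat_of_nonpos (by omega)]
    unfold GetAllOriginSteelLengthCombination_alt
    rw [if_pos hk0]
    rfl
  · by_cases hk1 : k = 1
    · subst hk1
      have hnd : All.Nodup := by
        by_contra hc
        exact hD ⟨rfl, hc⟩
      rw [pvA_eq_LA]
      show pvLA All 1 = _
      rw [pvLA_one, pvAlt_eq_keepNew All 1 (by omega)]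
      show _ = pvKeepNew [] (pvRawT All 1)
      rw [pvRawT_one, pvKeepNew_eq_self _ [] ?_ (by simp)]
      exact (List.nodup_map_iff (fun a b h => by simpa using h)).mpr hnd
    · have hm : k.toNat = (k.toNat - 2) + 2 := by omega
      rw [pvAlt_eq_keepNew All k (by omega), pvA_eq_LA, hm, pvLA_eq_keepNew]

theorem GetAllOriginSteelLengthCombination_changed : Claim_changed_GetAllOriginSteelLengthCombination := by
  unfold Claim_changed_GetAllOriginSteelLengthCombination; decide

theorem GetAllOriginSteelLengthCombination_tight : Claim_exact_GetAllOriginSteelLengthCombination := by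
  intro All k _ hD heq
  obtain ⟨hk, hdup⟩ := hD
  subst hk
  rw [pvA_eq_LA, pvAlt_eq_keepNew All 1 (by omega)] at heq
  have h1 : pvLA All 1 = All.map (fun s => [s]) := pvLA_one All
  rw [show ((1:Int).toNat) = 1 from rfl, h1, pvRawT_one] at heq
  have hnd : (All.map (fun s => [s])).Nodup := heq ▸ pvKeepNew_nodup _ []
  exact hdup ((List.nodup_map_iff (fun a b h => by simpa using h)).mp hnd)
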